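-- pv_equiv track=rewrite | github.com/ElectOMate/ElectOMate-Backend | app/custom_answer_evaluation/score_calculator.py | build_party_answers_matrix
-- ===== SOURCE A (Python) =====
-- from typing import List, Dict, Any
--
-- def build_party_answers_matrix(questions_data: Dict[str, Any], party_abbreviations: List[str]) -> List[List[int]]:
--     matrix = []
--     for question in questions_data["questions"]:
--         positions = question["positions"]
--         row = []
--         for party in party_abbreviations:
--             if party in positions.get("pro", {}).get("parties", {}):
--                 row.append(1)
--             elif party in positions.get("contra", {}).get("parties", {}):
--                 row.append(-1)
--             else:
--                 row.append(0)
--         matrix.append(row)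
--     return matrix
-- ===== SOURCE B (Python) =====
-- def build_party_answers_matrix(questions_data, party_abbreviations):
--     # Scatter-write algorithm: index party -> column positions once, then for each
--     # question start from a zero row and write -1 for contra, then 1 for pro (pro wins).
--     idx = {}
--     for j, party in enumerate(party_abbreviations):
--         idx.setdefault(party, []).append(j)
--     matrix = []
--     for question in questions_data["questions"]:
--         positions = question["positions"]
--         row = [0] * len(party_abbreviations)
--         for value, side in ((-1, "contra"), (1, "pro")):
--             for party in positions.get(side, {}).get("parties", {}):
--                 for j in idx.get(party, []):
--                     row[j] = value
--         matrix.append(row)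
--     return matrix
-- ===== Notes on version B (the rewrite author's own statement) =====
-- stated objective: alternative
-- what changed: B inverts the traversal: it builds a party-to-column-index map from party_abbreviations once, preallocates each row as zeros, and scatter-writes -1 for contra then 1 for pro entries into the columns, instead of A's per-abbreviation membership probes into the position dicts.
import Mathlib
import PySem

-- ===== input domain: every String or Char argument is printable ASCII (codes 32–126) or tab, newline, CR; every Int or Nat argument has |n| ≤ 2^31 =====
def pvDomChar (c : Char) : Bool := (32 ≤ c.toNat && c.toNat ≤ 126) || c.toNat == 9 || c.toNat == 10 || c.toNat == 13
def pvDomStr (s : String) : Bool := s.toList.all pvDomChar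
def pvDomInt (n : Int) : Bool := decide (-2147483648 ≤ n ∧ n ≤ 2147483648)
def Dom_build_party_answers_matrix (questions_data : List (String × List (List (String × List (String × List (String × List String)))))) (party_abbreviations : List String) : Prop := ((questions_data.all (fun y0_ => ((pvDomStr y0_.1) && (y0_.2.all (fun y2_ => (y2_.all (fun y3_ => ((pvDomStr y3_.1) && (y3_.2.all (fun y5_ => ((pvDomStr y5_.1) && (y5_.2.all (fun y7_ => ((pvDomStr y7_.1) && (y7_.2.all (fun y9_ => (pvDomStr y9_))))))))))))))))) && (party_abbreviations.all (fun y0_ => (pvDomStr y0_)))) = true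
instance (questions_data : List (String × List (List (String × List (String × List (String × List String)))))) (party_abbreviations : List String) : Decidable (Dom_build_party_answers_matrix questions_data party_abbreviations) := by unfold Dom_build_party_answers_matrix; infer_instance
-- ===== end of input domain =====

-- B inverts the traversal: a party->column-index map is built once from party_abbreviations,
-- each row starts as zeros, and the position lists are scatter-written into the columns
-- (-1 for contra, then 1 for pro, so pro wins); objective: alternative decomposition.

-- ===== PORT A =====
def build_party_answers_matrix (questions_data : List (String × List (List (String × List (String × List (String × List String)))))) (party_abbreviations : List String) : List (List Int) :=
  ((PySem.Dict.mk questions_data).getD "questions" []).foldl (fun matrix question =>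
    let positions := (PySem.Dict.mk question).getD "positions" []
    let row := party_abbreviations.foldl (fun row party =>
      if party ∈ (PySem.Dict.mk ((PySem.Dict.mk positions).getD "pro" [])).getD "parties" [] then
        row ++ [(1 : Int)]
      else if party ∈ (PySem.Dict.mk ((PySem.Dict.mk positions).getD "contra" [])).getD "parties" [] then
        row ++ [(-1 : Int)]
      else
        row ++ [(0 : Int)]) []
    matrix ++ [row]) []

-- ===== PORT B =====
-- row[j] = value is ported as List.set j.toNat value: exact here, since every stored index
-- comes from enumerate(party_abbreviations) and is a nonnegative in-range position.
def build_party_answers_matrix_alt (questions_data : List (String × List (List (String × List (String × List (String × List String)))))) (party_abbreviations : List String) : List (List Int) :=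
  let idx : PySem.Dict String (List Int) :=
    (PySem.List.enumerate party_abbreviations).foldl
      (fun d jp => d.insert jp.2 (d.getD jp.2 [] ++ [jp.1])) PySem.Dict.empty
  ((PySem.Dict.mk questions_data).getD "questions" []).map (fun question =>
    let positions := (PySem.Dict.mk question).getD "positions" []
    [((-1 : Int), "contra"), ((1 : Int), "pro")].foldl (fun row vs =>
      ((PySem.Dict.mk ((PySem.Dict.mk positions).getD vs.2 [])).getD "parties" []).foldl
        (fun row party => (idx.getD party []).foldl (fun row j => row.set j.toNat vs.1) row) row)
      (List.replicate party_abbreviations.length (0 : Int)))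

-- ===== PRECONDITION & SPEC =====
-- Pre_ excludes exactly the inputs where Python A raises KeyError: a missing "questions"
-- key, or a question without a "positions" key.
def Pre_build_party_answers_matrix (questions_data : List (String × List (List (String × List (String × List (String × List String)))))) (party_abbreviations : List String) : Prop :=
  (PySem.Dict.mk questions_data).contains "questions" = true ∧
  ∀ q ∈ (PySem.Dict.mk questions_data).getD "questions" [], (PySem.Dict.mk q).contains "positions" = true
instance (questions_data : List (String × List (List (String × List (String × List (String × List String)))))) (party_abbreviations : List String) : Decidable (Pre_build_party_answers_matrix questions_data party_abbreviations) := by unfold Pre_build_party_answers_matrix; infer_instance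

def pvWitness_build_party_answers_matrix : (List (String × List (List (String × List (String × List (String × List String)))))) × List String :=
  ([("questions", [[("positions", [("pro", [("parties", ["A", "B"])]), ("contra", [("parties", ["B", "C"])])])]])], ["A", "B", "C", "D"])

def Spec_build_party_answers_matrix (questions_data : List (String × List (List (String × List (String × List (String × List String)))))) (party_abbreviations : List String) (out : List (List Int)) : Prop := out = build_party_answers_matrix_alt questions_data party_abbreviations
instance (questions_data : List (String × List (List (String × List (String × List (String × List String)))))) (party_abbreviations : List String) (out : List (List Int)) : Decidable (Spec_build_party_answers_matrix questions_data party_abbreviations out) := by unfold Spec_build_party_answers_matrix; infer_instance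

-- ===== CLAIM (what is proved, stated in full; the proofs are below) =====
def Claim_equal_build_party_answers_matrix : Prop := ∀ (questions_data : List (String × List (List (String × List (String × List (String × List String)))))) (party_abbreviations : List String), Dom_build_party_answers_matrix questions_data party_abbreviations → Pre_build_party_answers_matrix questions_data party_abbreviations → Spec_build_party_answers_matrix questions_data party_abbreviations (build_party_answers_matrix questions_data party_abbreviations)

-- ===== LEMMAS AND PROOFS =====

-- lookup/length after the scatter-write folds
theorem length_foldl_set (l : List Int) (r : List Int) (v : Int) :
    (l.foldl (fun r j => r.set j.toNat v) r).length = r.length := by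
  induction l generalizing r with
  | nil => rfl
  | cons a t ih => simp [List.foldl_cons, ih]
theorem getElem?_foldl_set (l : List Int) (r : List Int) (v : Int) (j : Nat) :
    (l.foldl (fun r i => r.set i.toNat v) r)[j]? =
      if (∃ i ∈ l, i.toNat = j) ∧ j < r.length then some v else r[j]? := by
  induction l generalizing r with
  | nil => simp
  | cons a t ih =>
      rw [List.foldl_cons, ih]
      simp only [List.length_set, List.getElem?_set, List.mem_cons]
      by_cases hj : j < r.length <;> by_cases ha : a.toNat = j <;>
        by_cases ht : ∃ i ∈ t, i.toNat = j <;> simp_all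
theorem length_foldl_writes (ps : List String) (idx : PySem.Dict String (List Int)) (v : Int) (r : List Int) :
    (ps.foldl (fun r p => (idx.getD p []).foldl (fun r i => r.set i.toNat v) r) r).length = r.length := by
  induction ps generalizing r with
  | nil => rfl
  | cons a t ih => rw [List.foldl_cons, ih, length_foldl_set]
theorem getElem?_foldl_writes (ps : List String) (idx : PySem.Dict String (List Int)) (v : Int) (r : List Int) (j : Nat) :
    (ps.foldl (fun r p => (idx.getD p []).foldl (fun r i => r.set i.toNat v) r) r)[j]? =
      if (∃ p ∈ ps, ∃ i ∈ idx.getD p [], i.toNat = j) ∧ j < r.length then some v else r[j]? := by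
  induction ps generalizing r with
  | nil => simp
  | cons a t ih =>
      rw [List.foldl_cons, ih, length_foldl_set, getElem?_foldl_set]
      try simp only [List.mem_cons]
      by_cases h1 : ∃ i ∈ idx.getD a [], i.toNat = j <;>
        by_cases h2 : ∃ p ∈ t, ∃ i ∈ idx.getD p [], i.toNat = j <;>
        by_cases hj : j < r.length <;> (try simp_all) <;> (try split_ifs) <;> tauto

-- the index dict built by the fold: membership in the stored index lists
theorem mem_getD_idx_fold (l : List (Int × String)) (d : PySem.Dict String (List Int)) (p : String) (i : Int) :
    i ∈ (l.foldl (fun d jp => d.insert jp.2 (d.getD jp.2 [] ++ [jp.1])) d).getD p [] ↔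
      i ∈ d.getD p [] ∨ (i, p) ∈ l := by
  induction l generalizing d with
  | nil => simp
  | cons a t ih =>
      rw [List.foldl_cons, ih]
      simp only [PySem.Dict.getD_insert, List.mem_cons]
      by_cases hp : a.2 = p
      · subst hp
        rw [if_pos rfl]
        constructor
        · rintro (h | h)
          · rcases List.mem_append.mp h with h | h
            · exact Or.inl h
            · simp only [List.mem_singleton] at h; subst h
              exact Or.inr (Or.inl rfl)
          · exact Or.inr (Or.inr h)
        · rintro (h | h | h)
          · exact Or.inl (List.mem_append.mpr (Or.inl h))
          · rw [show i = a.1 from congrArg Prod.fst h]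
            exact Or.inl (List.mem_append.mpr (Or.inr (List.mem_singleton.mpr rfl)))
          · exact Or.inr h
      · rw [if_neg (fun hh => hp hh.symm)]
        constructor
        · rintro (h | h)
          · exact Or.inl h
          · exact Or.inr (Or.inr h)
        · rintro (h | h | h)
          · exact Or.inl h
          · exact absurd (congrArg Prod.snd h) (fun hh => hp hh.symm)
          · exact Or.inr h

theorem scatter_cond (pa : List String) (ps : List String) (j : Nat) :
    ((∃ p ∈ ps, ∃ i ∈ ((PySem.List.enumerate pa).foldl
        (fun d jp => d.insert jp.2 (d.getD jp.2 [] ++ [jp.1])) PySem.Dict.empty).getD p [], i.toNat = j)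
      ∧ j < pa.length) ↔ ∃ h : j < pa.length, pa[j] ∈ ps := by
  constructor
  · rintro ⟨⟨p, hp, i, hi, hij⟩, hj⟩
    rw [mem_getD_idx_fold] at hi
    rcases hi with h | h
    · simp [PySem.Dict.getD_empty] at h
    · rcases (PySem.List.mem_enumerate_iff _ _ _).mp h with ⟨k, hk, hkeq⟩
      have hik : i = (k : Int) := by have := congrArg Prod.fst hkeq; simpa using this
      have hpk : p = pa[k] := congrArg Prod.snd hkeq
      have hkj : k = j := by subst hik; simpa using hij
      subst hkj
      exact ⟨hk, hpk ▸ hp⟩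
  · rintro ⟨hj, hp⟩
    refine ⟨⟨pa[j], hp, (j : Int), ?_, by simp⟩, hj⟩
    rw [mem_getD_idx_fold]
    exact Or.inr ((PySem.List.mem_enumerate_iff _ _ _).mpr ⟨j, hj, by simp⟩)

-- A's probe row as a map
theorem row_probe (pa pro contra : List String) :
    pa.foldl (fun row party =>
      if party ∈ pro then row ++ [(1 : Int)]
      else if party ∈ contra then row ++ [(-1 : Int)]
      else row ++ [(0 : Int)]) []
    = pa.map (fun party =>
        if party ∈ pro then (1 : Int) else if party ∈ contra then (-1 : Int) else 0) := by
  have h : (fun (row : List Int) party =>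
      if party ∈ pro then row ++ [(1 : Int)]
      else if party ∈ contra then row ++ [(-1 : Int)]
      else row ++ [(0 : Int)])
    = (fun row party => row ++
        [if party ∈ pro then (1 : Int) else if party ∈ contra then (-1 : Int) else 0]) := by
    funext row party; split_ifs <;> rfl
  rw [h, PySem.List.foldl_append_singleton_eq_map, List.nil_append]

-- B's scatter row equals the same map
theorem row_scatter (pa pro contra : List String) :
    pro.foldl (fun row party =>
        (((PySem.List.enumerate pa).foldl
            (fun d jp => d.insert jp.2 (d.getD jp.2 [] ++ [jp.1])) PySem.Dict.empty).getD party []).foldl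
          (fun row j => row.set j.toNat (1 : Int)) row)
      (contra.foldl (fun row party =>
          (((PySem.List.enumerate pa).foldl
              (fun d jp => d.insert jp.2 (d.getD jp.2 [] ++ [jp.1])) PySem.Dict.empty).getD party []).foldl
            (fun row j => row.set j.toNat (-1 : Int)) row)
        (List.replicate pa.length (0 : Int)))
    = pa.map (fun party =>
        if party ∈ pro then (1 : Int) else if party ∈ contra then (-1 : Int) else 0) := by
  apply List.ext_getElem?
  intro j
  rw [List.getElem?_map, getElem?_foldl_writes, getElem?_foldl_writes]
  rw [length_foldl_writes, List.length_replicate, List.getElem?_replicate]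
  simp only [scatter_cond]
  by_cases hj : j < pa.length
  · rw [List.getElem?_eq_getElem hj]
    by_cases h1 : pa[j]'hj ∈ pro
    · simp [hj, h1]
    · by_cases h2 : pa[j]'hj ∈ contra <;> simp [hj, h1, h2]
  · rw [List.getElem?_eq_none (by omega), if_neg (fun h => hj h.choose),
      if_neg (fun h => hj h.choose), if_neg hj]
    rfl

-- ===== VERDICT (by name: the statement is the Claim_ definition above) =====
theorem build_party_answers_matrix_spec : Claim_equal_build_party_answers_matrix := by
  intro qd pa _ _
  unfold Spec_build_party_answers_matrix build_party_answers_matrix build_party_answers_matrix_alt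
  rw [PySem.List.foldl_append_singleton_eq_map]
  simp only [List.nil_append]
  refine List.map_congr_left (fun question _ => ?_)
  simp only [List.foldl_cons, List.foldl_nil]
  rw [row_probe, row_scatter]
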